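-- pv_equiv track=rewrite | github.com/daniel-reich/ubiquitous-fiesta | sHJmjMcZPiCsEujk6_4.py | pilish_string
-- ===== SOURCE A (Python) =====
-- def pilish_string(txt):
--   pi = str(314159265358979)
--   count = 0
--   pipos = 0
--   ans = ""
--   for i in txt:
--     ans += i
--     count += 1
--     if count == int(pi[pipos]):
--       ans += " "
--       pipos += 1
--       count = 0
--     if pipos >= len(pi):
--       return ans[:-1]
--   if count == 0:
--     return ans[:-1]
--   else:
--     return ans + (ans[-1])*(int(pi[pipos])-count)
-- ===== SOURCE B (Python) =====
-- def pilish_string(txt):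
--     words = []
--     rem = txt
--     for k in map(int, "314159265358979"):
--         chunk = rem[:k]
--         rem = rem[k:]
--         if len(chunk) == k:
--             words.append(chunk)
--         else:
--             if chunk:
--                 words.append(chunk + chunk[-1] * (k - len(chunk)))
--             return " ".join(words)
--     return " ".join(words)
-- ===== Notes on version B (the rewrite author's own statement) =====
-- stated objective: simpler
-- what changed: B iterates once over the 15 pi digits, slicing a whole chunk of the text per digit and joining the collected words, instead of A's per-character loop maintaining count/pipos state and trimming a trailing space.
import Mathlib
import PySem

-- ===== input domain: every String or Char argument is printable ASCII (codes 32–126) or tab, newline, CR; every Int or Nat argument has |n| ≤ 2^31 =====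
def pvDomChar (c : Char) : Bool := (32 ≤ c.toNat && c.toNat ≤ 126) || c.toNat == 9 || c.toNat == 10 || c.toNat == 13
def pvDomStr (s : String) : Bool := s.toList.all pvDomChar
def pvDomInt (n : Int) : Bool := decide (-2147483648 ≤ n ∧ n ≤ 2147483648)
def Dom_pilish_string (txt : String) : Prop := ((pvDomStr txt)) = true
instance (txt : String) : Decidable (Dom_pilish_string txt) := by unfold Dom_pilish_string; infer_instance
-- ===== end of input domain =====

-- B re-decomposes A: one pass over the 15 pi digits slicing whole chunks, instead of A's
-- per-character loop with counter/position state; same return value, objective: simpler.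

-- ===== PORT A =====
-- the digits of pi = str(314159265358979); int(pi[pipos]) is ported as piDigits.getD pipos 0
-- (the default 0 is never read: A only indexes pi at positions < 15)
def piDigits : List Nat := [3, 1, 4, 1, 5, 9, 2, 6, 5, 3, 5, 8, 9, 7, 9]

-- the for-loop of A: state (count, pipos, ans), one step per character; ans[-1] is ported
-- as getLastD ' ' (only read when count ≠ 0, where ans is nonempty)
def pilishA : List Char → Nat → Nat → List Char → List Char
  | [], count, pipos, ans =>
      if count = 0 then ans.dropLast
      else ans ++ List.replicate (piDigits.getD pipos 0 - count) (ans.getLastD ' ')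
  | c :: rest, count, pipos, ans =>
      if count + 1 = piDigits.getD pipos 0 then
        if pipos + 1 ≥ 15 then ((ans ++ [c]) ++ [' ']).dropLast
        else pilishA rest 0 (pipos + 1) ((ans ++ [c]) ++ [' '])
      else
        if pipos ≥ 15 then (ans ++ [c]).dropLast
        else pilishA rest (count + 1) pipos (ans ++ [c])

def pilish_string (txt : String) : String := String.ofList (pilishA txt.toList 0 0 [])

-- ===== PORT B =====
-- " ".join(words)
def joinW : List (List Char) → List Char
  | [] => []
  | [w] => w
  | w :: ws => w ++ ' ' :: joinW ws

-- the for-loop of B: one step per pi digit; rem[:k] / rem[k:] are take / drop (k ≥ 0);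
-- `if chunk:` is the emptiness test
def pilishB : List Nat → List Char → List (List Char) → List Char
  | [], _, words => joinW words
  | k :: ds, rem, words =>
      if (rem.take k).length = k then pilishB ds (rem.drop k) (words ++ [rem.take k])
      else if rem.take k = [] then joinW words
      else joinW (words ++
        [rem.take k ++ List.replicate (k - (rem.take k).length) ((rem.take k).getLastD ' ')])

def pilish_string_alt (txt : String) : String := String.ofList (pilishB piDigits txt.toList [])

-- ===== PRECONDITION & SPEC =====
def Spec_pilish_string (txt : String) (out : String) : Prop := out = pilish_string_alt txt
instance (txt : String) (out : String) : Decidable (Spec_pilish_string txt out) := by unfold Spec_pilish_string; infer_instance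

-- ===== CLAIM (what is proved, stated in full; the proofs are below) =====
def Claim_equal_pilish_string : Prop := ∀ (txt : String), Dom_pilish_string txt → Spec_pilish_string txt (pilish_string txt)

-- ===== LEMMAS AND PROOFS =====

-- each word followed by one space: A's `ans` at a word boundary
def flush (ws : List (List Char)) : List Char := ws.foldr (fun w acc => w ++ ' ' :: acc) []

theorem pilishA_nil (count pipos : Nat) (ans : List Char) :
    pilishA [] count pipos ans =
      if count = 0 then ans.dropLast
      else ans ++ List.replicate (piDigits.getD pipos 0 - count) (ans.getLastD ' ') := rfl

theorem pilishA_cons (c : Char) (rest : List Char) (count pipos : Nat) (ans : List Char) :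
    pilishA (c :: rest) count pipos ans =
      if count + 1 = piDigits.getD pipos 0 then
        if pipos + 1 ≥ 15 then ((ans ++ [c]) ++ [' ']).dropLast
        else pilishA rest 0 (pipos + 1) ((ans ++ [c]) ++ [' '])
      else
        if pipos ≥ 15 then (ans ++ [c]).dropLast
        else pilishA rest (count + 1) pipos (ans ++ [c]) := rfl

theorem pilishB_cons (k : Nat) (ds : List Nat) (rem : List Char) (words : List (List Char)) :
    pilishB (k :: ds) rem words =
      if (rem.take k).length = k then pilishB ds (rem.drop k) (words ++ [rem.take k])
      else if rem.take k = [] then joinW words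
      else joinW (words ++
        [rem.take k ++ List.replicate (k - (rem.take k).length) ((rem.take k).getLastD ' ')]) := rfl

theorem flush_nil : flush [] = [] := rfl

theorem flush_cons (a : List Char) (t : List (List Char)) :
    flush (a :: t) = a ++ ' ' :: flush t := rfl

theorem flush_snoc (ws : List (List Char)) (w : List Char) :
    flush (ws ++ [w]) = flush ws ++ w ++ [' '] := by
  induction ws with
  | nil => simp [flush]
  | cons a t ih => rw [List.cons_append, flush_cons, flush_cons, ih]; simp

theorem joinW_cons (a : List Char) (l : List (List Char)) (h : l ≠ []) :
    joinW (a :: l) = a ++ ' ' :: joinW l := by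
  cases l with
  | nil => exact absurd rfl h
  | cons b t => rfl

theorem join_snoc (ws : List (List Char)) (w : List Char) :
    joinW (ws ++ [w]) = flush ws ++ w := by
  induction ws with
  | nil => simp [joinW, flush]
  | cons a t ih =>
      rw [List.cons_append, joinW_cons a (t ++ [w]) (by simp), ih, flush_cons]
      simp

theorem flush_ne_nil (w : List Char) (ws : List (List Char)) : flush (w :: ws) ≠ [] := by
  rw [flush_cons]; simp

theorem dropLast_flush (ws : List (List Char)) : (flush ws).dropLast = joinW ws := by
  induction ws with
  | nil => simp [flush, joinW]
  | cons a t ih =>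
      cases t with
      | nil => simp [flush, joinW]
      | cons b u =>
          have hne := flush_ne_nil b u
          have h1 : flush (a :: b :: u) = (a ++ [' ']) ++ flush (b :: u) := by
            rw [flush_cons]; simp
          rw [h1, List.dropLast_append_of_ne_nil hne, joinW_cons a (b :: u) (by simp)]
          simp [ih]

theorem take_len_append (l r : List Char) : (l ++ r).take l.length = l := by
  induction l with
  | nil => rfl
  | cons a t ih => simp [ih]

theorem drop_len_append (l r : List Char) : (l ++ r).drop l.length = r := by
  induction l with
  | nil => rfl
  | cons a t ih => simp [ih]

theorem getLastD_append (l₁ l₂ : List Char) (d : Char) (h : l₂ ≠ []) :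
    (l₁ ++ l₂).getLastD d = l₂.getLastD d := by
  simp [List.getLastD_eq_getLast?, List.getLast?_append_of_ne_nil _ h]

theorem piDigits_pos (i : Nat) (h : i < 15) : 0 < piDigits.getD i 0 := by
  interval_cases i <;> decide

theorem piDigits_drop (i : Nat) (h : i < 15) :
    piDigits.drop i = piDigits.getD i 0 :: piDigits.drop (i + 1) := by
  interval_cases i <;> rfl

-- the loop correspondence: A mid-word with `part` of the current chunk already copied
-- equals B about to slice the chunk that starts with `part`
theorem main_lemma (chars : List Char) :
    ∀ (count pipos : Nat) (part : List Char) (words : List (List Char)),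
    pipos < 15 → part.length = count → count < piDigits.getD pipos 0 →
    pilishA chars count pipos (flush words ++ part) =
      pilishB (piDigits.drop pipos) (part ++ chars) words := by
  induction chars with
  | nil =>
      intro count pipos part words hp hl hc
      rw [piDigits_drop pipos hp, List.append_nil, pilishA_nil, pilishB_cons]
      have htake : part.take (piDigits.getD pipos 0) = part :=
        List.take_of_length_le (by omega)
      rw [htake, hl]
      have hne : ¬ count = piDigits.getD pipos 0 := by omega
      by_cases h0 : count = 0
      · have hpart : part = [] := List.eq_nil_of_length_eq_zero (by omega)
        subst hpart
        rw [if_pos h0, if_neg hne, if_pos rfl, List.append_nil, dropLast_flush]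
      · have hpart : part ≠ [] := by intro he; subst he; simp at hl; omega
        rw [if_neg h0, if_neg hne, if_neg hpart, join_snoc,
            getLastD_append _ _ _ hpart, List.append_assoc]
  | cons c rest ih =>
      intro count pipos part words hp hl hc
      rw [pilishA_cons]
      have hlen : (part ++ [c]).length = count + 1 := by simp [hl]
      have hpc : part ++ c :: rest = (part ++ [c]) ++ rest := by simp
      by_cases hcnt : count + 1 = piDigits.getD pipos 0
      · -- word completed: A appends a space, B slices a full chunk
        have hklen : piDigits.getD pipos 0 = (part ++ [c]).length := by rw [hlen]; omega
        have htake : (part ++ c :: rest).take (piDigits.getD pipos 0) = part ++ [c] := by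
          rw [hpc, hklen]; exact take_len_append _ _
        have hdrop : (part ++ c :: rest).drop (piDigits.getD pipos 0) = rest := by
          rw [hpc, hklen]; exact drop_len_append _ _
        have hans : ((flush words ++ part) ++ [c]) ++ [' ']
            = flush (words ++ [part ++ [c]]) := by
          rw [flush_snoc]; simp
        rw [piDigits_drop pipos hp, pilishB_cons, if_pos hcnt, htake, hdrop,
            if_pos (show (part ++ [c]).length = piDigits.getD pipos 0 from hklen.symm)]
        by_cases hend : pipos + 1 ≥ 15
        · have h15 : pipos + 1 = 15 := by omega
          rw [if_pos hend, hans, dropLast_flush, h15]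
          rfl
        · rw [if_neg hend, hans]
          have := ih 0 (pipos + 1) [] (words ++ [part ++ [c]])
            (by omega) rfl (piDigits_pos (pipos + 1) (by omega))
          simpa using this
      · -- mid-word: A keeps counting, B's call is unchanged
        rw [if_neg hcnt, if_neg (show ¬ pipos ≥ 15 by omega), List.append_assoc]
        have := ih (count + 1) pipos (part ++ [c]) words hp hlen (by omega)
        rw [this, hpc]

-- ===== VERDICT (by name: the statement is the Claim_ definition above) =====
theorem pilish_string_spec : Claim_equal_pilish_string := by
  intro txt _
  show pilish_string txt = pilish_string_alt txt
  unfold pilish_string pilish_string_alt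
  have := main_lemma txt.toList 0 0 [] [] (by omega) rfl (by decide)
  simp only [flush_nil, List.nil_append, List.append_nil, List.drop_zero] at this
  rw [this]
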